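-- pv_equiv track=rewrite | github.com/philipwerner/code-katas | string_pyramid/string_pyramid.py | watch_pyramid_from_above
-- ===== SOURCE A (Python) =====
-- def watch_pyramid_from_above(characters):
--     """Top view of the pyramid."""
--     if not characters:
--         return characters
--     c = len(characters)
--     rows = []
--
--     for i in range(c):
--         num_repeat = (c - (i + 1)) * 2 + 1
--         pre = ''
--         post = ''
--         if i > 0:
--             pre = characters[:i]
--             post = characters[0:i][::-1]
--         rows.append(pre + characters[i] * num_repeat + post)
--
--     for row in rows[::-1][1:]:
--         rows.append(row)
--     return '\n'.join(rows)
-- ===== SOURCE B (Python) =====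
-- def watch_pyramid_from_above(characters):
--     """Top view of the pyramid, grown from the core outwards: start with the
--     innermost character and repeatedly surround the grid with a ring of the
--     next character, working from the end of the string to its start."""
--     if not characters:
--         return characters
--     rows = [characters[-1]]
--     for x in characters[:-1][::-1]:
--         n = len(rows) + 2
--         rows = [x * n] + [x + row + x for row in rows] + [x * n]
--     return '\n'.join(rows)
-- ===== Notes on version B (the rewrite author's own statement) =====
-- stated objective: simpler
-- what changed: Replaces the palindrome-row construction (prefix + repeated char + reversed prefix for each index, then an explicit mirroring pass over the reversed row list) with a single inside-out loop that starts from the innermost character and repeatedly surrounds the grid with a ring of the next character.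
import Mathlib
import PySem

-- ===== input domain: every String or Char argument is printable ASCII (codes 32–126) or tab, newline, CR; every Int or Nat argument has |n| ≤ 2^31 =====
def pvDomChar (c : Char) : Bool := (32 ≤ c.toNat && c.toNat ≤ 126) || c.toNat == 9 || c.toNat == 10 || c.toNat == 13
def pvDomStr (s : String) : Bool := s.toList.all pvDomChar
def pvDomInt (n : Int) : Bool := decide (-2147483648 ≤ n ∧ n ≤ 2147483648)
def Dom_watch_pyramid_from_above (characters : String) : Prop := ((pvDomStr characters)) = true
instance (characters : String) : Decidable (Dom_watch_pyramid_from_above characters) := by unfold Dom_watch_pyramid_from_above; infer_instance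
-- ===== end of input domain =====

-- B builds the view by structural recursion (ring of chars[0] around the view of
-- chars[1:]) instead of A's palindrome rows plus a mirroring pass; objective: simpler.

-- ===== PORT A =====
-- body of A on the character list (A works on the string; we port on .toList, the PySem-recommended form)
def pyramidRowsA (l : List Char) : List Char :=
  let c : Int := l.length
  let rows : List (List Char) :=
    (PySem.List.pyRange 0 c 1).foldl (fun rows i =>
      let num_repeat : Int := (c - (i + 1)) * 2 + 1
      let pre : List Char := if i > 0 then PySem.List.slice l none (some i) else []
      let post : List Char :=
        if i > 0 then (PySem.List.slice? (PySem.List.slice l (some 0) (some i)) none none (-1)).getD []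
        else []
      rows ++ [pre ++ PySem.List.pyRepeat [(PySem.List.pyGet? l i).getD ' '] num_repeat ++ post]) []
  let rows2 : List (List Char) :=
    (PySem.List.slice ((PySem.List.slice? rows none none (-1)).getD []) (some 1) none).foldl
      (fun rs row => rs ++ [row]) rows
  PySem.Chars.join ['\n'] rows2

def watch_pyramid_from_above (characters : String) : String :=
  if characters.toList.isEmpty then characters
  else String.ofList (pyramidRowsA characters.toList)

-- ===== PORT B =====
-- body of B on the character list: fold of "surround with a ring of x" over the
-- reversed init of the string, starting from the innermost character
def pyramidGridB (l : List Char) : List (List Char) :=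
  ((PySem.List.slice? (PySem.List.slice l none (some (-1))) none none (-1)).getD []).foldl
    (fun rows x =>
      let n := rows.length + 2
      [List.replicate n x] ++ rows.map (fun row => x :: row ++ [x]) ++ [List.replicate n x])
    [[(PySem.List.pyGet? l (-1)).getD ' ']]

def watch_pyramid_from_above_alt (characters : String) : String :=
  if characters.toList.isEmpty then characters
  else String.ofList (PySem.Chars.join ['\n'] (pyramidGridB characters.toList))

-- ===== PRECONDITION & SPEC =====
def Spec_watch_pyramid_from_above (characters : String) (out : String) : Prop := out = watch_pyramid_from_above_alt characters
instance (characters : String) (out : String) : Decidable (Spec_watch_pyramid_from_above characters out) := by unfold Spec_watch_pyramid_from_above; infer_instance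

-- ===== CLAIM (what is proved, stated in full; the proofs are below) =====
def Claim_equal_watch_pyramid_from_above : Prop := ∀ (characters : String), Dom_watch_pyramid_from_above characters → Spec_watch_pyramid_from_above characters (watch_pyramid_from_above characters)

-- ===== LEMMAS AND PROOFS =====

-- closed form of A's i-th row
def rowSpec (l : List Char) (i : Nat) : List Char :=
  l.take i ++ List.replicate (2 * (l.length - i) - 1) (l.getD i ' ') ++ (l.take i).reverse

-- closed form of A's full row list
def rowsFull (l : List Char) : List (List Char) :=
  (List.range l.length).map (rowSpec l) ++ ((List.range l.length).map (rowSpec l)).reverse.tail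

theorem rowSpec_cons_succ (x : Char) (t : List Char) (j : Nat) :
    rowSpec (x :: t) (j + 1) = x :: (rowSpec t j ++ [x]) := by
  have hc : (x :: t).length - (j + 1) = t.length - j := by simp
  simp [rowSpec, List.append_assoc]

-- recursive formulation of B's ring construction (proof helper)
def gridRec : List Char → List (List Char)
  | [] => []
  | [x] => [[x]]
  | x :: y :: rest =>
      let inner := gridRec (y :: rest)
      let n := inner.length + 2
      [List.replicate n x] ++ inner.map (fun row => x :: row ++ [x]) ++ [List.replicate n x]

theorem foldr_gridRec (init : List Char) (z : Char) :
    List.foldr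
      (fun x rows =>
        let n := rows.length + 2
        [List.replicate n x] ++ rows.map (fun row => x :: row ++ [x]) ++ [List.replicate n x])
      [[z]] init = gridRec (init ++ [z]) := by
  induction init with
  | nil => simp [gridRec]
  | cons x init ih =>
    rcases hd : init ++ [z] with _ | ⟨y, rest⟩
    · exact absurd hd (by simp)
    · rw [List.foldr_cons, ih, hd]
      simp only [List.cons_append]
      rw [hd]
      simp [gridRec]

theorem pyramidGridB_eq_gridRec (l : List Char) (h : l ≠ []) :
    pyramidGridB l = gridRec l := by
  induction l using List.reverseRecOn with
  | nil => exact absurd rfl h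
  | append_singleton init z _ =>
  unfold pyramidGridB
  rw [PySem.List.slice_to_neg_one, PySem.List.slice?_none_none_neg_one]
  simp only [Option.getD_some, List.dropLast_concat, List.foldl_reverse,
    PySem.List.pyGet?_neg_one_append_singleton, Option.getD_some]
  exact foldr_gridRec init z

theorem length_grid (l : List Char) (h : l ≠ []) :
    (gridRec l).length = 2 * l.length - 1 := by
  induction l with
  | nil => exact absurd rfl h
  | cons x t ih =>
    cases t with
    | nil => simp [gridRec]
    | cons y rest =>
      have := ih (by simp)
      simp [gridRec] at this ⊢
      omega

theorem rowsFull_cons (x : Char) (t : List Char) (h : t ≠ []) :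
    rowsFull (x :: t) =
      List.replicate (2 * t.length + 1) x ::
        ((rowsFull t).map (fun r => x :: (r ++ [x])) ++ [List.replicate (2 * t.length + 1) x]) := by
  have hlen : t.length ≠ 0 := by simpa using h
  unfold rowsFull
  rw [show (x :: t).length = t.length + 1 from rfl, List.range_succ_eq_map]
  simp only [List.map_cons, List.map_map]
  have hmap : List.map (rowSpec (x :: t) ∘ Nat.succ) (List.range t.length)
      = List.map (fun r => x :: (r ++ [x])) ((List.range t.length).map (rowSpec t)) := by
    simp only [List.map_map]
    apply List.map_congr_left
    intro j hj
    simp [Function.comp, rowSpec_cons_succ]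
  rw [hmap]
  have h0 : rowSpec (x :: t) 0 = List.replicate (2 * t.length + 1) x := by
    simp [rowSpec]
    omega
  rw [h0]
  set A := (List.range t.length).map (rowSpec t) with hA
  have hAne : A ≠ [] := by
    simp [hA]
    omega
  have hBne : (List.map (fun r => x :: (r ++ [x])) A).reverse ≠ [] := by
    simpa using hAne
  rw [List.reverse_cons, List.tail_append_of_ne_nil hBne]
  rw [← List.map_reverse, ← List.map_tail]
  simp [List.append_assoc]

theorem rowsFull_eq_grid (l : List Char) (h : l ≠ []) : rowsFull l = gridRec l := by
  induction l with
  | nil => exact absurd rfl h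
  | cons x t ih =>
    cases t with
    | nil => simp [rowsFull, rowSpec, gridRec, List.range_one]
    | cons y rest =>
      rw [rowsFull_cons x (y :: rest) (by simp), ih (by simp)]
      have hg := length_grid (y :: rest) (by simp)
      simp only [gridRec]
      congr 1
      · congr 1
        simp at hg ⊢
        omega
      · congr 1
        congr 1
        simp at hg ⊢
        omega

theorem pyramidRowsA_eq (l : List Char) :
    pyramidRowsA l = PySem.Chars.join ['\n'] (rowsFull l) := by
  have hrows : (PySem.List.pyRange 0 (l.length : Int) 1).map (fun i =>
      (if i > 0 then PySem.List.slice l none (some i) else []) ++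
        PySem.List.pyRepeat [(PySem.List.pyGet? l i).getD ' '] (((l.length : Int) - (i + 1)) * 2 + 1) ++
        (if i > 0 then (PySem.List.slice? (PySem.List.slice l (some 0) (some i)) none none (-1)).getD []
         else []))
      = (List.range l.length).map (rowSpec l) := by
    rw [PySem.List.pyRange_one]
    simp only [Int.sub_zero, Int.toNat_natCast, List.map_map]
    apply List.map_congr_left
    intro k hk
    simp only [List.mem_range] at hk
    have hrep : ((((l.length : Int)) - ((0 : Int) + (k : Int) + 1)) * 2 + 1).toNat
        = 2 * (l.length - k) - 1 := by omega
    rcases Nat.eq_zero_or_pos k with h0 | h0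
    · subst h0
      simp [rowSpec, PySem.List.pyRepeat_singleton, List.getD, PySem.List.pyGet?_zero]
      omega
    · simp only [Function.comp, zero_add] at *
      rw [PySem.List.pyRepeat_singleton]
      simp [h0, rowSpec, PySem.List.slice_to_natCast, PySem.List.slice?_none_none_neg_one,
        PySem.List.pyGet?_natCast, hrep, List.getD]
  unfold pyramidRowsA
  simp only [PySem.List.foldl_append_singleton_eq_map, List.nil_append]
  rw [hrows]
  simp only [PySem.List.slice?_none_none_neg_one, Option.getD_some, PySem.List.slice_from_one]
  simp only [rowsFull, List.map_id']

-- ===== VERDICT (by name: the statement is the Claim_ definition above) =====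
theorem watch_pyramid_from_above_spec : Claim_equal_watch_pyramid_from_above := by
  intro characters _
  unfold Spec_watch_pyramid_from_above watch_pyramid_from_above watch_pyramid_from_above_alt
  by_cases h : characters.toList.isEmpty
  · simp [h]
  · simp only [h, if_neg, Bool.false_eq_true, not_false_iff]
    rw [pyramidRowsA_eq, rowsFull_eq_grid _ (by simpa using h),
      ← pyramidGridB_eq_gridRec _ (by simpa using h)]
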